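-- pv_equiv track=rewrite | github.com/AJXD2/hd2AiNews | hd2ainews/src/hd2.py | HDML_to_md
-- ===== SOURCE A (Python) =====
-- def HDML_to_md(text: str) -> str:
--     format_mapping = {
--         "<i=3>": "[b]",  # Bold
--         "</i=3>": "[b]",  # bold again?
--         "<i=1>": "[yellow]",  # Yellow text
--         "</i>": "[/]",  # Closing tag
--     }
--
--     for code, markup in format_mapping.items():
--
--         text = text.replace(code, markup)
--
--     return text
-- ===== SOURCE B (Python) =====
-- def HDML_to_md(text: str) -> str:
--     # Single left-to-right scan: at each position try the four tags in order,
--     # emit the markup and jump past the tag, otherwise copy one character.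
--     tags = (
--         ("<i=3>", "[b]"),
--         ("</i=3>", "[b]"),
--         ("<i=1>", "[yellow]"),
--         ("</i>", "[/]"),
--     )
--     out = []
--     i = 0
--     n = len(text)
--     while i < n:
--         for tag, markup in tags:
--             if text.startswith(tag, i):
--                 out.append(markup)
--                 i += len(tag)
--                 break
--         else:
--             out.append(text[i])
--             i += 1
--     return "".join(out)
-- ===== Notes on version B (the rewrite author's own statement) =====
-- stated objective: alternative
-- what changed: Replaced the four sequential whole-string str.replace passes with a single left-to-right scan that, at each position, tries the four tags in order and emits the markup (or copies one character), joining the pieces at the end.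
import Mathlib
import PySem

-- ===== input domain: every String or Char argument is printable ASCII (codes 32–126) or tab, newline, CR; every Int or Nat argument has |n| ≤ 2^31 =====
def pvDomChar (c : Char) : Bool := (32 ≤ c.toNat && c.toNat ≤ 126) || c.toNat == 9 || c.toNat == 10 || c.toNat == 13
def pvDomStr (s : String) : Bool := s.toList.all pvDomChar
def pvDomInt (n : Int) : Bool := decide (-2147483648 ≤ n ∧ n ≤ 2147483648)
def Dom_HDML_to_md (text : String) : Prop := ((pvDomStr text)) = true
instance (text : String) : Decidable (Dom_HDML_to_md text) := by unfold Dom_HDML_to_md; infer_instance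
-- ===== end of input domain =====

set_option maxRecDepth 8192

-- B replaces A's four sequential str.replace passes by one left-to-right scan that
-- dispatches on the tag found at each position (objective: alternative single-pass algorithm).

-- ===== PORT A =====
def HDML_to_md (text : String) : String :=
  -- four replaces, in the dict's insertion order
  let t1 := PySem.Str.replace text "<i=3>" "[b]"
  let t2 := PySem.Str.replace t1 "</i=3>" "[b]"
  let t3 := PySem.Str.replace t2 "<i=1>" "[yellow]"
  PySem.Str.replace t3 "</i>" "[/]"

-- ===== PORT B =====
-- the while-loop of Source B: at each position try the four tags in order, else copy one char
def hdmlScan : List Char → List Char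
  | [] => []
  | c :: t =>
    if List.isPrefixOf ['<','i','=','3','>'] (c :: t) then
      ['[','b',']'] ++ hdmlScan (t.drop 4)
    else if List.isPrefixOf ['<','/','i','=','3','>'] (c :: t) then
      ['[','b',']'] ++ hdmlScan (t.drop 5)
    else if List.isPrefixOf ['<','i','=','1','>'] (c :: t) then
      ['[','y','e','l','l','o','w',']'] ++ hdmlScan (t.drop 4)
    else if List.isPrefixOf ['<','/','i','>'] (c :: t) then
      ['[','/',']'] ++ hdmlScan (t.drop 3)
    else c :: hdmlScan t
termination_by l => l.length
decreasing_by all_goals simp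

def HDML_to_md_alt (text : String) : String :=
  String.ofList (hdmlScan text.toList)

-- ===== PRECONDITION & SPEC =====
def Spec_HDML_to_md (text : String) (out : String) : Prop := out = HDML_to_md_alt text
instance (text : String) (out : String) : Decidable (Spec_HDML_to_md text out) := by unfold Spec_HDML_to_md; infer_instance

-- ===== CLAIM (what is proved, stated in full; the proofs are below) =====
def Claim_equal_HDML_to_md : Prop := ∀ (text : String), Dom_HDML_to_md text → Spec_HDML_to_md text (HDML_to_md text)

-- ===== LEMMAS AND PROOFS =====

lemma hdmlScan_nil : hdmlScan [] = [] := by rw [hdmlScan.eq_def]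

lemma hdmlScan_cons (c : Char) (t : List Char) :
    hdmlScan (c :: t) =
      if List.isPrefixOf ['<','i','=','3','>'] (c :: t) then
        ['[','b',']'] ++ hdmlScan (t.drop 4)
      else if List.isPrefixOf ['<','/','i','=','3','>'] (c :: t) then
        ['[','b',']'] ++ hdmlScan (t.drop 5)
      else if List.isPrefixOf ['<','i','=','1','>'] (c :: t) then
        ['[','y','e','l','l','o','w',']'] ++ hdmlScan (t.drop 4)
      else if List.isPrefixOf ['<','/','i','>'] (c :: t) then
        ['[','/',']'] ++ hdmlScan (t.drop 3)
      else c :: hdmlScan t := by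
  rw [hdmlScan.eq_def]

-- reference form of one CPython str.replace pass with a nonempty pattern
def rep (old new : List Char) : List Char → List Char
  | [] => []
  | c :: t =>
    if List.isPrefixOf old (c :: t) then new ++ rep old new (t.drop (old.length - 1))
    else c :: rep old new t
termination_by l => l.length
decreasing_by all_goals simp

lemma rep_nil (old new : List Char) : rep old new [] = [] := by rw [rep.eq_def]

lemma rep_cons (old new : List Char) (c : Char) (t : List Char) :
    rep old new (c :: t) =
      if List.isPrefixOf old (c :: t) then new ++ rep old new (t.drop (old.length - 1))
      else c :: rep old new t := by
  rw [rep.eq_def]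

lemma isPrefixOf_cons_same (a : Char) (q t : List Char) :
    List.isPrefixOf (a :: q) (a :: t) = List.isPrefixOf q t := by
  simp [List.isPrefixOf]

lemma go_eq_rep (old new : List Char) (h : old ≠ []) :
    ∀ (fuel : Nat) (l acc : List Char), l.length ≤ fuel →
      PySem.Chars.replace.go old new fuel l acc = acc.reverse ++ rep old new l := by
  intro fuel
  induction fuel with
  | zero =>
    intro l acc hl
    have : l = [] := List.eq_nil_of_length_eq_zero (Nat.le_zero.mp hl)
    subst this
    rw [PySem.Chars.replace.go.eq_def]
    simp [rep_nil]
  | succ n ih =>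
    intro l acc hl
    cases l with
    | nil => rw [PySem.Chars.replace.go.eq_def]; simp [rep_nil]
    | cons c t =>
      simp only [List.length_cons] at hl
      rw [PySem.Chars.replace.go.eq_def]
      by_cases hp : List.isPrefixOf old (c :: t) = true
      · simp only [hp, if_true]
        obtain ⟨k, ho⟩ : ∃ k, old.length = k + 1 := by
          cases old with
          | nil => exact absurd rfl h
          | cons a b => exact ⟨b.length, by simp⟩
        have hdrop : List.drop old.length (c :: t) = t.drop (old.length - 1) := by
          rw [ho]; simp
        rw [ih (List.drop old.length (c :: t)) (new.reverse ++ acc)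
            (by rw [hdrop]; simp; omega)]
        rw [rep_cons, if_pos hp, hdrop]
        simp
      · simp only [hp]
        rw [ih t (c :: acc) (by omega)]
        rw [rep_cons, if_neg hp]
        simp

lemma replace_eq_rep (l old new : List Char) (h : old ≠ []) :
    PySem.Chars.replace l old new = rep old new l := by
  rw [PySem.Chars.replace, if_neg (by simp [List.isEmpty_iff, h])]
  exact go_eq_rep old new h l.length l [] (le_refl _)

-- literal .toList bridges
lemma tl_t1 : "<i=3>".toList = ['<','i','=','3','>'] := rfl
lemma tl_t2 : "</i=3>".toList = ['<','/','i','=','3','>'] := rfl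
lemma tl_t3 : "<i=1>".toList = ['<','i','=','1','>'] := rfl
lemma tl_t4 : "</i>".toList = ['<','/','i','>'] := rfl
lemma tl_m1 : "[b]".toList = ['[','b',']'] := rfl
lemma tl_m3 : "[yellow]".toList = ['[','y','e','l','l','o','w',']'] := rfl
lemma tl_m4 : "[/]".toList = ['[','/',']'] := rfl

lemma noLt_mb : ∀ c ∈ (['[','b',']'] : List Char), c ≠ '<' := by simp
lemma noLt_my : ∀ c ∈ (['[','y','e','l','l','o','w',']'] : List Char), c ≠ '<' := by simp
lemma noLt_s2 : ∀ c ∈ (['/','i','=','3','>'] : List Char), c ≠ '<' := by simp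
lemma noLt_s3 : ∀ c ∈ (['i','=','1','>'] : List Char), c ≠ '<' := by simp
lemma noLt_s4 : ∀ c ∈ (['/','i','>'] : List Char), c ≠ '<' := by simp

-- a pattern starting with '<' never matches inside a '<'-free block
lemma rep_no_lt (o n : List Char) (x y : List Char) (hx : ∀ c ∈ x, c ≠ '<') :
    rep ('<' :: o) n (x ++ y) = x ++ rep ('<' :: o) n y := by
  induction x with
  | nil => simp
  | cons a x' ih =>
    have ha : a ≠ '<' := hx a (by simp)
    rw [List.cons_append, rep_cons,
        if_neg (by simp [List.isPrefixOf]; intro hh; exact absurd hh.symm ha)]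
    rw [ih (fun c hc => hx c (by simp [hc]))]
    simp

lemma rep_head_ne (o n : List Char) (c : Char) (t : List Char) (hc : c ≠ '<') :
    rep ('<' :: o) n (c :: t) = c :: rep ('<' :: o) n t := by
  rw [rep_cons, if_neg (by simp [List.isPrefixOf]; intro hh; exact absurd hh.symm hc)]

-- replacing '<'-tags by '['-markup neither creates nor destroys a '<'-free, '['-free pattern
lemma prefix_rep_iff :
    ∀ (N : Nat) (p o n t : List Char), t.length ≤ N → '<' ∉ p → '[' ∉ p →
      ((p <+: rep ('<' :: o) ('[' :: n) t) ↔ (p <+: t)) := by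
  intro N
  induction N with
  | zero =>
    intro p o n t ht _ _
    have : t = [] := List.eq_nil_of_length_eq_zero (Nat.le_zero.mp ht)
    subst this
    rw [rep_nil]
  | succ N ih =>
    intro p o n t ht hp1 hp2
    cases t with
    | nil => rw [rep_nil]
    | cons c t' =>
      simp only [List.length_cons] at ht
      by_cases hpre : List.isPrefixOf ('<' :: o) (c :: t') = true
      · rw [rep_cons, if_pos hpre]
        have hc : c = '<' := by
          simp [List.isPrefixOf] at hpre
          exact hpre.1.symm
        cases p with
        | nil => simp
        | cons a p' =>
          have ha1 : a ≠ '<' := fun h => hp1 (by simp [h])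
          have ha2 : a ≠ '[' := fun h => hp2 (by simp [h])
          constructor
          · intro h
            rw [List.cons_append, List.cons_prefix_cons] at h
            exact absurd h.1 ha2
          · intro h
            rw [List.cons_prefix_cons] at h
            rw [hc] at h
            exact absurd h.1 ha1
      · rw [rep_cons, if_neg hpre]
        cases p with
        | nil => simp
        | cons a p' =>
          rw [List.cons_prefix_cons, List.cons_prefix_cons]
          have hm1 : '<' ∉ p' := fun h => hp1 (by simp [h])
          have hm2 : '[' ∉ p' := fun h => hp2 (by simp [h])
          rw [ih p' o n t' (by omega) hm1 hm2]

-- self lemmas: each tag matched at the head of its own replace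
lemma rep_self1 (m y : List Char) :
    rep ['<','i','=','3','>'] m (['<','i','=','3','>'] ++ y) = m ++ rep ['<','i','=','3','>'] m y := by
  rw [List.cons_append, rep_cons, if_pos (by simp [List.isPrefixOf])]
  simp

lemma rep_self2 (m y : List Char) :
    rep ['<','/','i','=','3','>'] m (['<','/','i','=','3','>'] ++ y) = m ++ rep ['<','/','i','=','3','>'] m y := by
  rw [List.cons_append, rep_cons, if_pos (by simp [List.isPrefixOf])]
  simp

lemma rep_self3 (m y : List Char) :
    rep ['<','i','=','1','>'] m (['<','i','=','1','>'] ++ y) = m ++ rep ['<','i','=','1','>'] m y := by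
  rw [List.cons_append, rep_cons, if_pos (by simp [List.isPrefixOf])]
  simp

lemma rep_self4 (m y : List Char) :
    rep ['<','/','i','>'] m (['<','/','i','>'] ++ y) = m ++ rep ['<','/','i','>'] m y := by
  rw [List.cons_append, rep_cons, if_pos (by simp [List.isPrefixOf])]
  simp

-- pair lemmas: an earlier tag never matches across a later tag at the head
lemma rep_pair12 (m y : List Char) :
    rep ['<','i','=','3','>'] m (['<','/','i','=','3','>'] ++ y) = ['<','/','i','=','3','>'] ++ rep ['<','i','=','3','>'] m y := by
  rw [List.cons_append, rep_cons, if_neg (by simp [List.isPrefixOf])]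
  rw [rep_no_lt _ _ _ y noLt_s2]
  rfl

lemma rep_pair13 (m y : List Char) :
    rep ['<','i','=','3','>'] m (['<','i','=','1','>'] ++ y) = ['<','i','=','1','>'] ++ rep ['<','i','=','3','>'] m y := by
  rw [List.cons_append, rep_cons, if_neg (by simp [List.isPrefixOf])]
  rw [rep_no_lt _ _ _ y noLt_s3]
  rfl

lemma rep_pair23 (m y : List Char) :
    rep ['<','/','i','=','3','>'] m (['<','i','=','1','>'] ++ y) = ['<','i','=','1','>'] ++ rep ['<','/','i','=','3','>'] m y := by
  rw [List.cons_append, rep_cons, if_neg (by simp [List.isPrefixOf])]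
  rw [rep_no_lt _ _ _ y noLt_s3]
  rfl

lemma rep_pair14 (m y : List Char) :
    rep ['<','i','=','3','>'] m (['<','/','i','>'] ++ y) = ['<','/','i','>'] ++ rep ['<','i','=','3','>'] m y := by
  rw [List.cons_append, rep_cons, if_neg (by simp [List.isPrefixOf])]
  rw [rep_no_lt _ _ _ y noLt_s4]
  rfl

lemma rep_pair24 (m y : List Char) :
    rep ['<','/','i','=','3','>'] m (['<','/','i','>'] ++ y) = ['<','/','i','>'] ++ rep ['<','/','i','=','3','>'] m y := by
  rw [List.cons_append, rep_cons, if_neg (by simp [List.isPrefixOf])]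
  rw [rep_no_lt _ _ _ y noLt_s4]
  rfl

lemma rep_pair34 (m y : List Char) :
    rep ['<','i','=','1','>'] m (['<','/','i','>'] ++ y) = ['<','/','i','>'] ++ rep ['<','i','=','1','>'] m y := by
  rw [List.cons_append, rep_cons, if_neg (by simp [List.isPrefixOf])]
  rw [rep_no_lt _ _ _ y noLt_s4]
  rfl

-- the main equivalence on char lists
lemma chain_eq_scan : ∀ (n : Nat) (l : List Char), l.length ≤ n →
    rep ['<','/','i','>'] ['[','/',']']
      (rep ['<','i','=','1','>'] ['[','y','e','l','l','o','w',']']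
        (rep ['<','/','i','=','3','>'] ['[','b',']']
          (rep ['<','i','=','3','>'] ['[','b',']'] l))) = hdmlScan l := by
  intro n
  induction n with
  | zero =>
    intro l hl
    have : l = [] := List.eq_nil_of_length_eq_zero (Nat.le_zero.mp hl)
    subst this
    simp [rep_nil, hdmlScan_nil]
  | succ n ih =>
    intro l hl
    cases l with
    | nil => simp [rep_nil, hdmlScan_nil]
    | cons c t =>
      simp only [List.length_cons] at hl
      by_cases h1 : List.isPrefixOf ['<','i','=','3','>'] (c :: t) = true
      · obtain ⟨r, hr⟩ := List.isPrefixOf_iff_prefix.mp h1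
        have hT : t = ['i','=','3','>'] ++ r := by
          simp only [List.cons_append] at hr
          injection hr with _ h
          exact h.symm
        rw [← hr]
        rw [rep_self1, rep_no_lt _ _ _ _ noLt_mb,
            rep_no_lt _ _ _ _ noLt_mb,
            rep_no_lt _ _ _ _ noLt_mb]
        rw [ih r (by rw [hT] at hl; simp at hl; omega)]
        rw [hr, hdmlScan_cons, if_pos h1, hT]
        simp
      · by_cases h2 : List.isPrefixOf ['<','/','i','=','3','>'] (c :: t) = true
        · obtain ⟨r, hr⟩ := List.isPrefixOf_iff_prefix.mp h2
          have hT : t = ['/','i','=','3','>'] ++ r := by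
            simp only [List.cons_append] at hr
            injection hr with _ h
            exact h.symm
          rw [← hr]
          rw [rep_pair12, rep_self2,
              rep_no_lt _ _ _ _ noLt_mb,
              rep_no_lt _ _ _ _ noLt_mb]
          rw [ih r (by rw [hT] at hl; simp at hl; omega)]
          rw [hr, hdmlScan_cons, if_neg h1, if_pos h2, hT]
          simp
        · by_cases h3 : List.isPrefixOf ['<','i','=','1','>'] (c :: t) = true
          · obtain ⟨r, hr⟩ := List.isPrefixOf_iff_prefix.mp h3
            have hT : t = ['i','=','1','>'] ++ r := by
              simp only [List.cons_append] at hr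
              injection hr with _ h
              exact h.symm
            rw [← hr]
            rw [rep_pair13, rep_pair23, rep_self3,
                rep_no_lt _ _ _ _ noLt_my]
            rw [ih r (by rw [hT] at hl; simp at hl; omega)]
            rw [hr, hdmlScan_cons, if_neg h1, if_neg h2, if_pos h3, hT]
            simp
          · by_cases h4 : List.isPrefixOf ['<','/','i','>'] (c :: t) = true
            · obtain ⟨r, hr⟩ := List.isPrefixOf_iff_prefix.mp h4
              have hT : t = ['/','i','>'] ++ r := by
                simp only [List.cons_append] at hr
                injection hr with _ h
                exact h.symm
              rw [← hr]
              rw [rep_pair14, rep_pair24, rep_pair34, rep_self4]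
              rw [ih r (by rw [hT] at hl; simp at hl; omega)]
              rw [hr, hdmlScan_cons, if_neg h1, if_neg h2, if_neg h3, if_pos h4, hT]
              simp
            · have hIH := ih t (by omega)
              by_cases hc : c = '<'
              · subst hc
                have p1 : ¬ (['i','=','3','>'] <+: t) := fun hp =>
                  h1 (by
                    rw [show (['<','i','=','3','>'] : List Char) = '<' :: ['i','=','3','>'] from rfl,
                        isPrefixOf_cons_same]
                    exact List.isPrefixOf_iff_prefix.mpr hp)
                have p2 : ¬ (['/','i','=','3','>'] <+: t) := fun hp =>
                  h2 (by
                    rw [show (['<','/','i','=','3','>'] : List Char) = '<' :: ['/','i','=','3','>'] from rfl,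
                        isPrefixOf_cons_same]
                    exact List.isPrefixOf_iff_prefix.mpr hp)
                have p3 : ¬ (['i','=','1','>'] <+: t) := fun hp =>
                  h3 (by
                    rw [show (['<','i','=','1','>'] : List Char) = '<' :: ['i','=','1','>'] from rfl,
                        isPrefixOf_cons_same]
                    exact List.isPrefixOf_iff_prefix.mpr hp)
                have p4 : ¬ (['/','i','>'] <+: t) := fun hp =>
                  h4 (by
                    rw [show (['<','/','i','>'] : List Char) = '<' :: ['/','i','>'] from rfl,
                        isPrefixOf_cons_same]
                    exact List.isPrefixOf_iff_prefix.mpr hp)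
                -- step each replace through the unmatched '<'
                rw [show (rep ['<','i','=','3','>'] ['[','b',']'] ('<' :: t)) =
                      '<' :: rep ['<','i','=','3','>'] ['[','b',']'] t from by
                  rw [rep_cons, if_neg (by
                    rw [show (['<','i','=','3','>'] : List Char) = '<' :: ['i','=','3','>'] from rfl,
                        isPrefixOf_cons_same]
                    exact fun hh => p1 (List.isPrefixOf_iff_prefix.mp hh))]]
                rw [show (rep ['<','/','i','=','3','>'] ['[','b',']']
                        ('<' :: rep ['<','i','=','3','>'] ['[','b',']'] t)) =
                      '<' :: rep ['<','/','i','=','3','>'] ['[','b',']']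
                        (rep ['<','i','=','3','>'] ['[','b',']'] t) from by
                  rw [rep_cons, if_neg (by
                    rw [show (['<','/','i','=','3','>'] : List Char) = '<' :: ['/','i','=','3','>'] from rfl,
                        isPrefixOf_cons_same]
                    intro hh
                    have := (prefix_rep_iff t.length ['/','i','=','3','>'] ['i','=','3','>'] ['b',']'] t
                        (le_refl _) (by decide) (by decide)).mp (List.isPrefixOf_iff_prefix.mp hh)
                    exact p2 this)]]
                rw [show (rep ['<','i','=','1','>'] ['[','y','e','l','l','o','w',']']
                        ('<' :: rep ['<','/','i','=','3','>'] ['[','b',']']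
                          (rep ['<','i','=','3','>'] ['[','b',']'] t))) =
                      '<' :: rep ['<','i','=','1','>'] ['[','y','e','l','l','o','w',']']
                        (rep ['<','/','i','=','3','>'] ['[','b',']']
                          (rep ['<','i','=','3','>'] ['[','b',']'] t)) from by
                  rw [rep_cons, if_neg (by
                    rw [show (['<','i','=','1','>'] : List Char) = '<' :: ['i','=','1','>'] from rfl,
                        isPrefixOf_cons_same]
                    intro hh
                    have s1 := (prefix_rep_iff (rep ['<','i','=','3','>'] ['[','b',']'] t).length
                        ['i','=','1','>'] ['/','i','=','3','>'] ['b',']']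
                        (rep ['<','i','=','3','>'] ['[','b',']'] t)
                        (le_refl _) (by decide) (by decide)).mp (List.isPrefixOf_iff_prefix.mp hh)
                    have s2 := (prefix_rep_iff t.length ['i','=','1','>'] ['i','=','3','>'] ['b',']'] t
                        (le_refl _) (by decide) (by decide)).mp s1
                    exact p3 s2)]]
                rw [show (rep ['<','/','i','>'] ['[','/',']']
                        ('<' :: rep ['<','i','=','1','>'] ['[','y','e','l','l','o','w',']']
                          (rep ['<','/','i','=','3','>'] ['[','b',']']
                            (rep ['<','i','=','3','>'] ['[','b',']'] t)))) =
                      '<' :: rep ['<','/','i','>'] ['[','/',']']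
                        (rep ['<','i','=','1','>'] ['[','y','e','l','l','o','w',']']
                          (rep ['<','/','i','=','3','>'] ['[','b',']']
                            (rep ['<','i','=','3','>'] ['[','b',']'] t))) from by
                  rw [rep_cons, if_neg (by
                    rw [show (['<','/','i','>'] : List Char) = '<' :: ['/','i','>'] from rfl,
                        isPrefixOf_cons_same]
                    intro hh
                    have s1 := (prefix_rep_iff _ ['/','i','>'] ['i','=','1','>'] ['y','e','l','l','o','w',']'] _
                        (le_refl _) (by decide) (by decide)).mp (List.isPrefixOf_iff_prefix.mp hh)
                    have s2 := (prefix_rep_iff _ ['/','i','>'] ['/','i','=','3','>'] ['b',']'] _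
                        (le_refl _) (by decide) (by decide)).mp s1
                    have s3 := (prefix_rep_iff t.length ['/','i','>'] ['i','=','3','>'] ['b',']'] t
                        (le_refl _) (by decide) (by decide)).mp s2
                    exact p4 s3)]]
                rw [hIH, hdmlScan_cons, if_neg h1, if_neg h2, if_neg h3, if_neg h4]
              · rw [rep_head_ne _ _ _ _ hc, rep_head_ne _ _ _ _ hc,
                    rep_head_ne _ _ _ _ hc, rep_head_ne _ _ _ _ hc]
                rw [hIH, hdmlScan_cons, if_neg h1, if_neg h2, if_neg h3, if_neg h4]

-- ===== VERDICT (by name: the statement is the Claim_ definition above) =====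
theorem HDML_to_md_spec : Claim_equal_HDML_to_md := by
  intro text _
  unfold Spec_HDML_to_md HDML_to_md HDML_to_md_alt
  rw [← String.toList_inj]
  simp only [PySem.Str.toList_replace, String.toList_ofList]
  rw [replace_eq_rep _ _ _ (by decide), replace_eq_rep _ _ _ (by decide),
      replace_eq_rep _ _ _ (by decide), replace_eq_rep _ _ _ (by decide)]
  rw [tl_t1, tl_t2, tl_t3, tl_t4, tl_m1, tl_m3, tl_m4]
  exact chain_eq_scan text.toList.length text.toList (le_refl _)
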